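-- pv_equiv track=rewrite | github.com/yungangwu/RL | ddz/app/ddz/game/utils.py | get_request_minor_card_count
-- ===== SOURCE A (Python) =====
-- Action_Tri_With_Single_Wing = 7
--
-- Action_Sequence_Tri_With_Single_Wing = 8
--
-- Action_Tri_With_Pair_Wing = 9
--
-- Action_Sequence_Tri_With_Pair_Wing = 10
--
-- Action_Bomb_With_Single_Wing = 11
--
-- Action_Bomb_With_Pair_Wing = 12
--
-- def action_index_to_sequence_cards(action_index, start, minlength, maxlength):
--     total_length = 12 - (start - 1)
--     total_length = total_length if total_length <= maxlength else maxlength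
--     total_length = total_length - (minlength - 1)
--     if action_index <= total_length:
--         return start, minlength + action_index - 1
--     else:
--         return action_index_to_sequence_cards(action_index - total_length, start + 1, minlength, maxlength)
--
-- def get_request_minor_card_count(action_type, action_index):
--     card_count_list = None
--     if action_type == Action_Tri_With_Single_Wing:
--         card_count_list = [1]
--     elif action_type == Action_Sequence_Tri_With_Single_Wing:
--         _, length = action_index_to_sequence_cards(action_index, 1, 2, 5)
--         card_count_list = [1 for _ in range(length)]
--     elif action_type == Action_Tri_With_Pair_Wing:
--         card_count_list = [2]
--     elif action_type == Action_Sequence_Tri_With_Pair_Wing: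
--         _, length = action_index_to_sequence_cards(action_index, 1, 2, 4)
--         card_count_list = [2 for _ in range(length)]
--     elif action_type == Action_Bomb_With_Single_Wing:
--         card_count_list = [1, 1]
--     elif action_type == Action_Bomb_With_Pair_Wing:
--         card_count_list = [2]
--     return card_count_list
-- ===== SOURCE B (Python) =====
-- # Iterative re-implementation: the recursive helper is replaced by a single
-- # bounded loop over the 12 possible sequence start positions, and the wing
-- # lists are built by list multiplication from a small dispatch.
--
-- def get_request_minor_card_count(action_type, action_index):
--     if action_type == 7:
--         return [1]
--     if action_type == 9 or action_type == 12:
--         return [2]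
--     if action_type == 11:
--         return [1, 1]
--     if action_type == 8 or action_type == 10:
--         fill, maxlength = (1, 5) if action_type == 8 else (2, 4)
--         rem = action_index
--         for start in range(1, 13):
--             total_length = min(13 - start, maxlength) - 1
--             if rem <= total_length:
--                 return [fill] * (rem + 1)
--             rem -= total_length
--         raise ValueError("action_index out of range")
--     return None
-- ===== Notes on version B (the rewrite author's own statement) =====
-- stated objective: alternative
-- what changed: The unbounded recursive helper action_index_to_sequence_cards is replaced by a single bounded for-loop over the 12 possible sequence start positions, and the wing lists are built by list multiplication from a flattened dispatch of the if/elif chain.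
import Mathlib
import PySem

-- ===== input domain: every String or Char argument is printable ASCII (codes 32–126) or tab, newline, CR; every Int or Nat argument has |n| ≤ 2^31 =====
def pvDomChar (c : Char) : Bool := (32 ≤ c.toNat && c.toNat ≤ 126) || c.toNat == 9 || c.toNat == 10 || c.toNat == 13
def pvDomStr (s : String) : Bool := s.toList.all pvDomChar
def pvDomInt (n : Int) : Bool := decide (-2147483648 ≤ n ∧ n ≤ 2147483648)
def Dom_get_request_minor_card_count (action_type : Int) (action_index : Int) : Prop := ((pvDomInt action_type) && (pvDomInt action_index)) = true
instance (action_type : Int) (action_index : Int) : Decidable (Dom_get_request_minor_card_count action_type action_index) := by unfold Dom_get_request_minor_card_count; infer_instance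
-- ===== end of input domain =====

-- B replaces A's unbounded recursive helper by one bounded loop over the 12
-- possible sequence start positions (alternative decomposition, same cost).

-- ===== PORT A =====
-- A's helper recurses without bound; the Nat fuel only makes the same
-- computation total (none = the recursion did not finish — A raises there,
-- excluded by Pre_). Fuel 13 covers every terminating run inside Pre_.
def action_index_to_sequence_cards (fuel : Nat) (action_index : Int) (start : Int)
    (minlength : Int) (maxlength : Int) : Option (Int × Int) :=
  match fuel with
  | 0 => none
  | Nat.succ f =>
    let total_length := 12 - (start - 1)
    let total_length := if total_length ≤ maxlength then total_length else maxlength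
    let total_length := total_length - (minlength - 1)
    if action_index ≤ total_length then some (start, minlength + action_index - 1)
    else action_index_to_sequence_cards f (action_index - total_length) (start + 1) minlength maxlength

def get_request_minor_card_count (action_type : Int) (action_index : Int) : Option (List Int) :=
  if action_type == 7 then some [1]
  else if action_type == 8 then
    match action_index_to_sequence_cards 13 action_index 1 2 5 with
    | some (_, length) => some (List.replicate length.toNat 1)  -- [1 for _ in range(length)]
    | none => none
  else if action_type == 9 then some [2]
  else if action_type == 10 then
    match action_index_to_sequence_cards 13 action_index 1 2 4 with
    | some (_, length) => some (List.replicate length.toNat 2)  -- [2 for _ in range(length)]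
    | none => none
  else if action_type == 11 then some [1, 1]
  else if action_type == 12 then some [2]
  else none

-- ===== PORT B =====
-- the for-loop of Source B over range(1, 13) with accumulator rem (total_length
-- inlined); none = the loop fell through (Source B raises ValueError there,
-- outside Pre_).
def pvFindLen (maxlength : Int) : List Int → Int → Option Int
  | [], _ => none
  | start :: rest, rem =>
    if rem ≤ min (13 - start) maxlength - 1 then some (rem + 1)
    else pvFindLen maxlength rest (rem - (min (13 - start) maxlength - 1))

def get_request_minor_card_count_alt (action_type : Int) (action_index : Int) : Option (List Int) :=
  if action_type == 7 then some [1]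
  else if action_type == 9 || action_type == 12 then some [2]
  else if action_type == 11 then some [1, 1]
  else if action_type == 8 || action_type == 10 then
    let p : Int × Int := if action_type == 8 then (1, 5) else (2, 4)
    (pvFindLen p.2 (PySem.List.pyRange 1 13 1) action_index).map
      (fun len => List.replicate len.toNat p.1)  -- [fill] * (rem + 1)
  else none

-- ===== PRECONDITION & SPEC =====
-- Pre_ excludes exactly the inputs on which A's recursion never terminates
-- (Python raises RecursionError): action_type 8 with index > 38, action_type
-- 10 with index > 30.
def Pre_get_request_minor_card_count (action_type : Int) (action_index : Int) : Prop :=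
  (action_type = 8 → action_index ≤ 38) ∧ (action_type = 10 → action_index ≤ 30)
instance (action_type : Int) (action_index : Int) : Decidable (Pre_get_request_minor_card_count action_type action_index) := by unfold Pre_get_request_minor_card_count; infer_instance
def pvWitness_get_request_minor_card_count : Int × Int := (8, 17)

def Spec_get_request_minor_card_count (action_type : Int) (action_index : Int) (out : Option (List Int)) : Prop := out = get_request_minor_card_count_alt action_type action_index
instance (action_type : Int) (action_index : Int) (out : Option (List Int)) : Decidable (Spec_get_request_minor_card_count action_type action_index out) := by unfold Spec_get_request_minor_card_count; infer_instance

-- ===== CLAIM (what is proved, stated in full; the proofs are below) =====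
def Claim_equal_get_request_minor_card_count : Prop := ∀ (action_type : Int) (action_index : Int), Dom_get_request_minor_card_count action_type action_index → Pre_get_request_minor_card_count action_type action_index → Spec_get_request_minor_card_count action_type action_index (get_request_minor_card_count action_type action_index)

-- ===== LEMMAS AND PROOFS =====

-- one step of A's recursion equals one step of B's loop (same decrement, same value on a hit)
lemma agree (m : Int) : ∀ (k f : Nat) (ai s : Int), k ≤ f →
    ∀ L, pvFindLen m ((List.range k).map (fun (i : Nat) => s + (i : Int))) ai = some L →
    ∃ s', action_index_to_sequence_cards f ai s 2 m = some (s', L) := by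
  intro k
  induction k with
  | zero => intro f ai s _ L hL; simp [pvFindLen] at hL
  | succ n ih =>
    intro f ai s hkf L hL
    rw [List.range_succ_eq_map, List.map_cons, List.map_map] at hL
    obtain ⟨f', rfl⟩ : ∃ f', f = f' + 1 := ⟨f - 1, by omega⟩
    simp only [pvFindLen, Nat.cast_zero, add_zero] at hL
    simp only [action_index_to_sequence_cards]
    have htl : ((if 12 - (s - 1) ≤ m then 12 - (s - 1) else m) - (2 - 1)) =
        min (13 - s) m - 1 := by
      rcases le_or_gt (13 - s) m with h | h <;> simp [min_def] <;> omega
    rw [htl]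
    by_cases hc : ai ≤ min (13 - s) m - 1
    · rw [if_pos hc] at hL ⊢
      refine ⟨s, ?_⟩
      simp only [Option.some.injEq, Prod.mk.injEq, true_and] at hL ⊢
      omega
    · rw [if_neg hc] at hL ⊢
      apply ih f' (ai - (min (13 - s) m - 1)) (s + 1) (by omega) L
      rw [show ((fun (i : Nat) => (s + 1) + (i : Int))) = ((fun (i : Nat) => s + (i : Int)) ∘ Nat.succ) from by
        funext i; simp only [Function.comp_apply]; push_cast; ring]
      exact hL

lemma agreeRange (m ai L : Int) (h : pvFindLen m (PySem.List.pyRange 1 13 1) ai = some L) :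
    ∃ s', action_index_to_sequence_cards 13 ai 1 2 m = some (s', L) := by
  apply agree m 12 13 ai 1 (by norm_num) L
  rw [show ((List.range 12).map (fun (i : Nat) => (1 : Int) + (i : Int))) = PySem.List.pyRange 1 13 1 from by decide]
  exact h

-- if B's loop falls through, the index exceeded the total capacity of the starts
lemma findLen_none_gt (m : Int) : ∀ (l : List Int) (rem : Int), l ≠ [] →
    pvFindLen m l rem = none → (l.map (fun s => min (13 - s) m - 1)).sum < rem := by
  intro l
  induction l with
  | nil => intro rem h; exact absurd rfl h
  | cons x rest ih =>
    intro rem _ hnone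
    simp only [pvFindLen] at hnone
    split_ifs at hnone with hc
    rcases Decidable.em (rest = []) with hr | hr
    · subst hr
      simp only [List.map_cons, List.map_nil, List.sum_cons, List.sum_nil, add_zero]
      omega
    · have := ih (rem - (min (13 - x) m - 1)) hr hnone
      simp only [List.map_cons, List.sum_cons]
      omega

-- inside Pre_, B's loop always hits within the 12 start positions
lemma findLen_isSome5 (ai : Int) (h : ai ≤ 38) :
    ∃ L, pvFindLen 5 (PySem.List.pyRange 1 13 1) ai = some L := by
  cases hc : pvFindLen 5 (PySem.List.pyRange 1 13 1) ai with
  | some L => exact ⟨L, rfl⟩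
  | none =>
    have := findLen_none_gt 5 (PySem.List.pyRange 1 13 1) ai (by decide) hc
    rw [show ((PySem.List.pyRange 1 13 1).map (fun s => min (13 - s) 5 - 1)).sum = 38 from by decide] at this
    omega

lemma findLen_isSome4 (ai : Int) (h : ai ≤ 30) :
    ∃ L, pvFindLen 4 (PySem.List.pyRange 1 13 1) ai = some L := by
  cases hc : pvFindLen 4 (PySem.List.pyRange 1 13 1) ai with
  | some L => exact ⟨L, rfl⟩
  | none =>
    have := findLen_none_gt 4 (PySem.List.pyRange 1 13 1) ai (by decide) hc
    rw [show ((PySem.List.pyRange 1 13 1).map (fun s => min (13 - s) 4 - 1)).sum = 30 from by decide] at this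
    omega

-- ===== VERDICT (by name: the statement is the Claim_ definition above) =====
theorem get_request_minor_card_count_spec : Claim_equal_get_request_minor_card_count := by
  intro at_ ai _ hpre
  unfold Spec_get_request_minor_card_count
  unfold get_request_minor_card_count get_request_minor_card_count_alt
  obtain ⟨h8, h10⟩ := hpre
  by_cases e7 : at_ = 7
  · simp [e7]
  by_cases e8 : at_ = 8
  · subst e8
    obtain ⟨L, hL⟩ := findLen_isSome5 ai (h8 rfl)
    obtain ⟨s', hA⟩ := agreeRange 5 ai L hL
    norm_num [hA, hL]
  by_cases e9 : at_ = 9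
  · simp [e9]
  by_cases e10 : at_ = 10
  · subst e10
    obtain ⟨L, hL⟩ := findLen_isSome4 ai (h10 rfl)
    obtain ⟨s', hA⟩ := agreeRange 4 ai L hL
    norm_num [hA, hL]
  by_cases e11 : at_ = 11
  · simp [e11]
  by_cases e12 : at_ = 12
  · simp [e12]
  · simp [e7, e8, e9, e10, e11, e12]
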